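-- pv_equiv track=rewrite | github.com/MUSKA777/advent_of_code | day_03/binary_diagnostic.py | get_frequency_of_individual_bits
-- ===== SOURCE A (Python) =====
-- from typing import List
--
-- def get_frequency_of_individual_bits(list_of_bits: List[str]):
--     frequency_of_individual_bits: List[List[int]] = []
--     for _value in list_of_bits:
--
--         for index, bit in enumerate([*_value]):
--             if index + 1 > len(frequency_of_individual_bits):
--                 # 0 1
--                 frequency_of_individual_bits.append([0, 0])
--
--             if bit == "0":
--                 frequency_of_individual_bits[index][0] += 1
--             elif bit == "1":
--                 frequency_of_individual_bits[index][1] += 1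
--     return frequency_of_individual_bits
-- ===== SOURCE B (Python) =====
-- def get_frequency_of_individual_bits(list_of_bits):
--     max_len = max((len(s) for s in list_of_bits), default=0)
--     frequency_of_individual_bits = []
--     for idx in range(max_len):
--         zeros = sum(1 for s in list_of_bits if idx < len(s) and s[idx] == "0")
--         ones = sum(1 for s in list_of_bits if idx < len(s) and s[idx] == "1")
--         frequency_of_individual_bits.append([zeros, ones])
--     return frequency_of_individual_bits
-- ===== Notes on version B (the rewrite author's own statement) =====
-- stated objective: alternative
-- what changed: Replaces A's per-string accumulation into a growing mutable table with a column-wise pass: compute the maximum string length, then for each bit position count the '0'/'1' occurrences across all strings directly.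
import Mathlib
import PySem

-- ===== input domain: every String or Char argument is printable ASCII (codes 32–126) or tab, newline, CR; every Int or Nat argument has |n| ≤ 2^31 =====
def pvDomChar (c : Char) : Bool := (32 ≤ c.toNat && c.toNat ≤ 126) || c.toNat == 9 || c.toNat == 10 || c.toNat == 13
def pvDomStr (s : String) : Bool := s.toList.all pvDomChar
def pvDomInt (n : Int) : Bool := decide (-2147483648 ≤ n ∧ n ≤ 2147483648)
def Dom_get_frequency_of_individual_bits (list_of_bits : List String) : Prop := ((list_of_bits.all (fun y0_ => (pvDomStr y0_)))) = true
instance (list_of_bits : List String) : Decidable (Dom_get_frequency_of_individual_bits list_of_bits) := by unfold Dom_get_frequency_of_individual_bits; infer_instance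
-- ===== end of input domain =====

-- B replaces A's per-string accumulation into a growing table with a column-wise pass
-- (max length, then count '0'/'1' per bit position); objective: alternative decomposition, not speed.

-- ===== PORT A =====
-- enumerate(value): (index, char) pairs starting at 0
def pvEnum {α : Type} : List α → Nat → List (Nat × α)
  | [], _ => []
  | a :: as, k => (k, a) :: pvEnum as (k + 1)

-- body of A's inner loop: maybe append [0,0], then increment the matching counter in place
def pvInnerStep (freq : List (List Int)) (p : Nat × Char) : List (List Int) :=
  let freq1 := if p.1 + 1 > freq.length then freq ++ [[0, 0]] else freq
  if p.2 = '0' then freq1.modify p.1 (fun e => e.modify 0 (· + 1))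
  else if p.2 = '1' then freq1.modify p.1 (fun e => e.modify 1 (· + 1))
  else freq1

def get_frequency_of_individual_bits (list_of_bits : List String) : List (List Int) :=
  list_of_bits.foldl (fun freq v => (pvEnum v.toList 0).foldl pvInnerStep freq) []

-- ===== PORT B =====
-- sum(1 for s in list_of_bits if idx < len(s) and s[idx] == c)
def pvBitCount (list_of_bits : List String) (idx : Nat) (c : Char) : Int :=
  list_of_bits.foldl
    (fun acc s => if idx < s.toList.length ∧ s.toList.getD idx ' ' = c then acc + 1 else acc) 0

-- max((len(s) for s in list_of_bits), default=0)
def pvMaxLen (list_of_bits : List String) : Nat :=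
  list_of_bits.foldl (fun m s => max m s.toList.length) 0

def get_frequency_of_individual_bits_alt (list_of_bits : List String) : List (List Int) :=
  (List.range (pvMaxLen list_of_bits)).map
    (fun idx => [pvBitCount list_of_bits idx '0', pvBitCount list_of_bits idx '1'])

-- ===== PRECONDITION & SPEC =====
def Spec_get_frequency_of_individual_bits (list_of_bits : List String) (out : List (List Int)) : Prop := out = get_frequency_of_individual_bits_alt list_of_bits
instance (list_of_bits : List String) (out : List (List Int)) : Decidable (Spec_get_frequency_of_individual_bits list_of_bits out) := by unfold Spec_get_frequency_of_individual_bits; infer_instance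

-- ===== CLAIM (what is proved, stated in full; the proofs are below) =====
def Claim_equal_get_frequency_of_individual_bits : Prop := ∀ (list_of_bits : List String), Dom_get_frequency_of_individual_bits list_of_bits → Spec_get_frequency_of_individual_bits list_of_bits (get_frequency_of_individual_bits list_of_bits)

-- ===== LEMMAS AND PROOFS =====

-- the column of counts at position idx
def pvCol (l : List String) (idx : Nat) : List Int :=
  [pvBitCount l idx '0', pvBitCount l idx '1']

-- hybrid state: columns < k already see the new string s, columns ≥ k do not yet
def pvHyb (l : List String) (s : String) (k : Nat) : List (List Int) :=
  (List.range (max (pvMaxLen l) k)).map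
    (fun idx => if idx < k then pvCol (l ++ [s]) idx else pvCol l idx)

theorem pvFoldlMax_ge (l : List String) (a : Nat) :
    a ≤ l.foldl (fun m s => max m s.toList.length) a := by
  induction l generalizing a with
  | nil => simp
  | cons x xs ih =>
      simp only [List.foldl_cons]
      exact le_trans (Nat.le_max_left _ _) (ih _)

theorem pvMaxLen_bound {l : List String} {s : String} (h : s ∈ l) :
    s.toList.length ≤ pvMaxLen l := by
  unfold pvMaxLen
  generalize (0 : Nat) = a
  induction l generalizing a with
  | nil => cases h
  | cons x xs ih =>
      simp only [List.foldl_cons]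
      rcases List.mem_cons.mp h with h | h
      · subst h; exact le_trans (Nat.le_max_right _ _) (pvFoldlMax_ge _ _)
      · exact ih h _

theorem pvBitCount_eq_countP (l : List String) (idx : Nat) (c : Char) :
    pvBitCount l idx c =
      (l.countP (fun s => decide (idx < s.toList.length ∧ s.toList.getD idx ' ' = c)) : Int) := by
  unfold pvBitCount
  have key : ∀ (l : List String) (a : Int),
      l.foldl (fun acc s => if idx < s.toList.length ∧ s.toList.getD idx ' ' = c then acc + 1 else acc) a
        = a + (l.countP (fun s => decide (idx < s.toList.length ∧ s.toList.getD idx ' ' = c)) : Int) := by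
    intro l
    induction l with
    | nil => intro a; simp
    | cons x xs ih =>
        intro a
        rw [List.foldl_cons, ih, List.countP_cons]
        by_cases hx : idx < x.toList.length ∧ x.toList.getD idx ' ' = c
        · rw [if_pos hx, if_pos (decide_eq_true hx)]
          push_cast
          ring
        · rw [if_neg hx, if_neg (by simpa using hx)]
          push_cast
          ring
  simpa using key l 0

theorem pvCol_of_ge {l : List String} {idx : Nat} (h : pvMaxLen l ≤ idx) :
    pvCol l idx = [0, 0] := by
  have hz : ∀ c : Char, pvBitCount l idx c = 0 := by
    intro c
    rw [pvBitCount_eq_countP]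
    have hcz : l.countP (fun s => decide (idx < s.toList.length ∧ s.toList.getD idx ' ' = c)) = 0 := by
      rw [List.countP_eq_zero]
      intro t ht
      have hb := pvMaxLen_bound ht
      simp only [decide_eq_true_eq, not_and]
      intro hlt
      exact absurd hlt (by omega)
    rw [hcz]
    simp
  simp [pvCol, hz]

theorem pvBitCount_append (l : List String) (s : String) (idx : Nat) (c : Char) :
    pvBitCount (l ++ [s]) idx c =
      pvBitCount l idx c +
        (if idx < s.toList.length ∧ s.toList.getD idx ' ' = c then 1 else 0) := by
  unfold pvBitCount
  rw [List.foldl_append]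
  simp only [List.foldl_cons, List.foldl_nil]
  split <;> simp

theorem pvCol_append_of_ge {l : List String} {s : String} {idx : Nat}
    (h : s.toList.length ≤ idx) : pvCol (l ++ [s]) idx = pvCol l idx := by
  have hn : ∀ c : Char, ¬ (idx < s.toList.length ∧ s.toList.getD idx ' ' = c) := by
    intro c hc
    omega
  simp only [pvCol, pvBitCount_append, if_neg (hn '0'), if_neg (hn '1'), add_zero]

theorem pvMaxLen_append (l : List String) (s : String) :
    pvMaxLen (l ++ [s]) = max (pvMaxLen l) s.toList.length := by
  unfold pvMaxLen
  rw [List.foldl_append]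
  simp

theorem pvMapRangeModify (M k : Nat) (g g' : Nat → List Int) (f : List Int → List Int)
    (_hk : k < M) (h1 : f (g k) = g' k) (h2 : ∀ j, j ≠ k → g j = g' j) :
    ((List.range M).map g).modify k f = (List.range M).map g' := by
  apply List.ext_getElem
  · simp
  · intro i h₁ h₂
    have hiM : i < M := by simpa using h₂
    rw [List.getElem_modify]
    by_cases hik : k = i
    · subst hik; simpa [List.getElem_map, List.getElem_range] using h1
    · simp only [if_neg hik, List.getElem_map, List.getElem_range]
      exact h2 i (fun h => hik h.symm)

theorem pvHyb_zero (l : List String) (s : String) :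
    pvHyb l s 0 = get_frequency_of_individual_bits_alt l := by
  simp [pvHyb, pvCol, get_frequency_of_individual_bits_alt]

theorem pvHyb_final (l : List String) (s : String) :
    pvHyb l s s.toList.length = get_frequency_of_individual_bits_alt (l ++ [s]) := by
  unfold pvHyb get_frequency_of_individual_bits_alt
  rw [pvMaxLen_append]
  apply List.map_congr_left
  intro idx hidx
  show (if idx < s.toList.length then pvCol (l ++ [s]) idx else pvCol l idx) = pvCol (l ++ [s]) idx
  by_cases hcase : idx < s.toList.length
  · rw [if_pos hcase]
  · rw [if_neg hcase]
    exact (pvCol_append_of_ge (by omega)).symm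

theorem pvHyb_step (l : List String) (s : String) (k : Nat) (hk : k < s.toList.length) :
    pvInnerStep (pvHyb l s k) (k, s.toList[k]) = pvHyb l s (k + 1) := by
  have hchar : s.toList.getD k ' ' = s.toList[k] := List.getD_eq_getElem _ _ hk
  have hlen : (pvHyb l s k).length = max (pvMaxLen l) k := by simp [pvHyb]
  have hfreq1 : (if k + 1 > (pvHyb l s k).length then pvHyb l s k ++ [[0, 0]] else pvHyb l s k)
      = (List.range (max (pvMaxLen l) (k + 1))).map
          (fun idx => if idx < k then pvCol (l ++ [s]) idx else pvCol l idx) := by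
    by_cases hLk : pvMaxLen l ≤ k
    · rw [if_pos (by omega)]
      rw [(by omega : max (pvMaxLen l) (k + 1) = k + 1), List.range_succ, List.map_append]
      unfold pvHyb
      rw [(by omega : max (pvMaxLen l) k = k)]
      congr 1
      simp only [List.map_cons, List.map_nil]
      rw [if_neg (by omega : ¬ k < k), pvCol_of_ge hLk]
    · rw [if_neg (by omega)]
      unfold pvHyb
      rw [(by omega : max (pvMaxLen l) k = max (pvMaxLen l) (k + 1))]
  have hagree : ∀ j, j ≠ k →
      (if j < k then pvCol (l ++ [s]) j else pvCol l j)
        = (if j < k + 1 then pvCol (l ++ [s]) j else pvCol l j) := by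
    intro j hj
    by_cases h : j < k
    · rw [if_pos h, if_pos (by omega)]
    · rw [if_neg h, if_neg (by omega)]
  have hkM : k < max (pvMaxLen l) (k + 1) := by omega
  have hcolk : pvCol (l ++ [s]) k =
      [pvBitCount l k '0' + (if s.toList[k] = '0' then 1 else 0),
       pvBitCount l k '1' + (if s.toList[k] = '1' then 1 else 0)] := by
    have h0 : (if k < s.toList.length ∧ s.toList.getD k ' ' = '0' then (1 : Int) else 0)
        = (if s.toList[k] = '0' then (1 : Int) else 0) := by
      rw [hchar]; simp [show k < s.length from by simpa using hk]
    have h1 : (if k < s.toList.length ∧ s.toList.getD k ' ' = '1' then (1 : Int) else 0)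
        = (if s.toList[k] = '1' then (1 : Int) else 0) := by
      rw [hchar]; simp [show k < s.length from by simpa using hk]
    simp only [pvCol, pvBitCount_append, h0, h1]
  have hmod0 : ∀ (a b : Int) (f : Int → Int), [a, b].modify 0 f = [f a, b] := fun _ _ _ => rfl
  have hmod1 : ∀ (a b : Int) (f : Int → Int), [a, b].modify 1 f = [a, f b] := fun _ _ _ => rfl
  unfold pvInnerStep
  simp only []
  rw [hfreq1]
  unfold pvHyb
  by_cases h0 : s.toList[k] = '0'
  · rw [if_pos h0]
    refine pvMapRangeModify _ _ _ _ _ hkM ?_ hagree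
    rw [if_neg (by omega : ¬ k < k), if_pos (by omega : k < k + 1), hcolk, h0]
    simp only [pvCol, hmod0]
    norm_num
    decide
  · rw [if_neg h0]
    by_cases h1 : s.toList[k] = '1'
    · rw [if_pos h1]
      refine pvMapRangeModify _ _ _ _ _ hkM ?_ hagree
      rw [if_neg (by omega : ¬ k < k), if_pos (by omega : k < k + 1), hcolk, h1]
      simp only [pvCol, hmod1]
      norm_num
      decide
    · rw [if_neg h1]
      apply List.map_congr_left
      intro j hj
      by_cases hjk : j = k
      · subst hjk
        rw [if_neg (by omega : ¬ j < j), if_pos (by omega : j < j + 1), hcolk]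
        simp [pvCol, h0, h1]
      · exact hagree j hjk

theorem pvHyb_fold (l : List String) (s : String) :
    ∀ (cs : List Char) (k : Nat), s.toList.drop k = cs → k ≤ s.toList.length →
      List.foldl pvInnerStep (pvHyb l s k) (pvEnum cs k) = pvHyb l s s.toList.length := by
  intro cs
  induction cs with
  | nil =>
      intro k hdrop hle
      have hge : s.toList.length ≤ k := List.drop_eq_nil_iff.mp hdrop
      have hkn : k = s.toList.length := by omega
      subst hkn
      simp [pvEnum]
  | cons c cs' ih =>
      intro k hdrop hle
      have hk : k < s.toList.length := by
        by_contra h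
        rw [List.drop_eq_nil_of_le (by omega)] at hdrop
        simp at hdrop
      have hc : s.toList[k] = c := by
        have h0 : (s.toList.drop k)[0]'(by rw [hdrop]; simp) = c := by simp [hdrop]
        rw [List.getElem_drop] at h0
        simpa using h0
      have hdrop' : s.toList.drop (k + 1) = cs' := by
        have hdd := List.drop_drop (i := 1) (j := k) (l := s.toList)
        rw [← (by omega : k + 1 = k + 1)]
        rw [(by omega : k + 1 = k + 1), ← hdd, hdrop]
        simp
      simp only [pvEnum, List.foldl_cons]
      rw [← hc, pvHyb_step l s k hk]
      exact ih (k + 1) hdrop' (by omega)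

theorem pvMainEq (l : List String) :
    get_frequency_of_individual_bits l = get_frequency_of_individual_bits_alt l := by
  induction l using List.reverseRecOn with
  | nil => simp [get_frequency_of_individual_bits, get_frequency_of_individual_bits_alt, pvMaxLen]
  | append_singleton l s ih =>
      unfold get_frequency_of_individual_bits
      rw [List.foldl_append]
      simp only [List.foldl_cons, List.foldl_nil]
      have hA : l.foldl (fun freq v => (pvEnum v.toList 0).foldl pvInnerStep freq) []
          = get_frequency_of_individual_bits_alt l := ih
      rw [hA, ← pvHyb_zero l s, ← pvHyb_final l s]
      exact pvHyb_fold l s s.toList 0 rfl (by omega)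

-- ===== VERDICT (by name: the statement is the Claim_ definition above) =====
theorem get_frequency_of_individual_bits_spec : Claim_equal_get_frequency_of_individual_bits := by
  intro l _
  unfold Spec_get_frequency_of_individual_bits
  exact pvMainEq l
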